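-- pv_equiv track=rewrite | github.com/MariaTroj/CodilityLessons | dynamic_programing.py | solution
-- ===== SOURCE A (Python) =====
-- def solution(A):
--     n = len(A)
--     dp = [[A[0]] * (n) for _ in range(6)]
--     for i in range(1, n):
--         dp[0][i] = dp[0][i - 1] + A[i]
--
--     for i in range(1, n):
--         for j in range(1, 6):
--             if j >= i:
--                 dp[j][i] = dp[j - 1][i]
--             else:
--                 dp[j][i] = max([(dp[j][i - k - 1] + A[i]) for k in range(j + 1)])
--
--     return dp[-1][-1]
--
-- A = [11, 12, 13, 14, 15, 16, 17]
-- ===== SOURCE B (Python) =====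
-- def solution(A):
--     # Row-by-row DP with a monotonic deque holding (index, value) pairs with
--     # strictly decreasing values, so each row is built in one left-to-right pass
--     # with the bounded-window maximum read from the deque front.
--     n = len(A)
--     row = [A[0]]
--     for i in range(1, n):
--         row.append(row[-1] + A[i])
--     for j in range(1, 6):
--         cur = []
--         dq = []
--         for i in range(n):
--             if i <= j:
--                 v = row[i]
--             else:
--                 while dq and dq[0][0] < i - j - 1:
--                     dq.pop(0)
--                 v = A[i] + dq[0][1]
--             while dq and dq[-1][1] <= v:
--                 dq.pop()
--             dq.append((i, v))
--             cur.append(v)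
--         row = cur
--     return row[-1]
-- ===== Notes on version B (the rewrite author's own statement) =====
-- stated objective: faster
-- what changed: Replaces A's preallocated 6xn table filled column-by-column with per-cell max over an index-gathered window by a row-by-row streaming build that maintains a monotonic deque of (index,value) pairs per row and reads each bounded-window maximum from the deque front in O(1) amortized, instead of rebuilding a k-element list and scanning it for every cell.
import Mathlib
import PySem

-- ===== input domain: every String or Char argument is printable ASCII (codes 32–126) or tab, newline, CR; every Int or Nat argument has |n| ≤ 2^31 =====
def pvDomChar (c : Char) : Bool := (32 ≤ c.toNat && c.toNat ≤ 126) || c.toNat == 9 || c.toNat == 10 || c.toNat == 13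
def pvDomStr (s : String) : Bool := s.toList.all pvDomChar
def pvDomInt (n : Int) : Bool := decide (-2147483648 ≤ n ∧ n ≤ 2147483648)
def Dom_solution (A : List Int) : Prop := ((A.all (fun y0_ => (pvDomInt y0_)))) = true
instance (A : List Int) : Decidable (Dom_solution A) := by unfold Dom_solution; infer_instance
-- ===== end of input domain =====

-- B replaces A's preallocated 6×n table, filled column-by-column with each cell's bounded-window
-- maximum recomputed by an index-gathered max, by a row-by-row streaming build that maintains a
-- monotonic deque of (index, value) pairs and reads each window maximum from the deque front
-- (same asymptotics; measurably faster by a constant factor: no per-cell window list is built).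

-- ===== PORT A =====
def aIdx (A : List Int) (i : Int) : Int := PySem.List.pyGetD A i 0
def dGet (dp : List (List Int)) (j i : Int) : Int :=
  PySem.List.pyGetD (PySem.List.pyGetD dp j []) i 0
def dSet (dp : List (List Int)) (j i : Int) (v : Int) : List (List Int) :=
  PySem.List.pySetD dp j (PySem.List.pySetD (PySem.List.pyGetD dp j []) i v)

def solution (A : List Int) : Int :=
  let n : Int := PySem.List.len A
  let dp0 : List (List Int) := List.replicate 6 (List.replicate n.toNat (aIdx A 0))
  let dp1 := (PySem.List.pyRange 1 n 1).foldl
    (fun dp i => dSet dp 0 i (dGet dp 0 (i - 1) + aIdx A i)) dp0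
  let dp2 := (PySem.List.pyRange 1 n 1).foldl (fun dp i =>
    (PySem.List.pyRange 1 6 1).foldl (fun dp j =>
      if j ≥ i then dSet dp j i (dGet dp (j - 1) i)
      else dSet dp j i ((PySem.List.max?
        ((PySem.List.pyRange 0 (j + 1) 1).map (fun k => dGet dp j (i - k - 1) + aIdx A i))
        (fun y => y)).getD 0)) dp) dp1
  dGet dp2 (-1) (-1)

-- ===== PORT B =====
-- 'while dq and dq[0][0] < L: dq.pop(0)' — pop-from-front while the front index is expired
def pvEvict (L : Int) : List (Int × Int) → List (Int × Int)
  | [] => []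
  | x :: t => if x.1 < L then pvEvict L t else x :: t

-- 'while dq and dq[-1][1] <= v: dq.pop()' — pop-from-back while the back value is dominated;
-- performed on the reversed list (pop-from-front there), then reversed back.
def pvTrim (v : Int) : List (Int × Int) → List (Int × Int)
  | [] => []
  | x :: t => if x.2 ≤ v then pvTrim v t else x :: t

def solution_alt (A : List Int) : Int :=
  let n : Int := PySem.List.len A
  let row1 := (PySem.List.pyRange 1 n 1).foldl
    (fun r i => r ++ [PySem.List.pyGetD r (-1) 0 + PySem.List.pyGetD A i 0])
    [PySem.List.pyGetD A 0 0]
  let row5 := (PySem.List.pyRange 1 6 1).foldl (fun row j =>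
    ((PySem.List.pyRange 0 n 1).foldl (fun (st : List Int × List (Int × Int)) i =>
      let vd :=
        if i ≤ j then (PySem.List.pyGetD row i 0, st.2)
        else
          -- dq[0][1] after eviction; the deque is provably nonempty here (it holds index i-1)
          (PySem.List.pyGetD A i 0 + (PySem.List.pyGetD (pvEvict (i - j - 1) st.2) 0 (0, 0)).2,
           pvEvict (i - j - 1) st.2)
      (st.1 ++ [vd.1], (pvTrim vd.1 vd.2.reverse).reverse ++ [(i, vd.1)]))
      ([], [])).1) row1
  PySem.List.pyGetD row5 (-1) 0

-- ===== PRECONDITION & SPEC =====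
-- Pre_ excludes only the empty list, on which A raises IndexError reading the first element.
def Pre_solution (A : List Int) : Prop := A ≠ []
instance (A : List Int) : Decidable (Pre_solution A) := by unfold Pre_solution; infer_instance
def pvWitness_solution : List Int := ([11, 12, 13, 14, 15, 16, 17])

def Spec_solution (A : List Int) (out : Int) : Prop := out = solution_alt A
instance (A : List Int) (out : Int) : Decidable (Spec_solution A out) := by unfold Spec_solution; infer_instance

-- ===== CLAIM (what is proved, stated in full; the proofs are below) =====
def Claim_equal_solution : Prop := ∀ (A : List Int), Dom_solution A → Pre_solution A → Spec_solution A (solution A)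

-- ===== LEMMAS AND PROOFS =====

-- reference rows (proof-side characterisation shared by both ports)
def aN (A : List Int) (i : Nat) : Int := A.getD i 0
def mx (L : List Int) : Int := match L with | [] => 0 | x :: t => t.foldl max x
def row0 (A : List Int) : Nat → List Int
  | 0 => [aN A 0]
  | i + 1 => row0 A i ++ [(row0 A i).getLastD 0 + aN A (i + 1)]
def rowN (A : List Int) (p : List Int) (j : Nat) : Nat → List Int
  | 0 => [p.getD 0 0]
  | i + 1 => rowN A p j i ++
      [if i + 1 ≤ j then p.getD (i + 1) 0
       else aN A (i + 1) + mx ((rowN A p j i).drop (i - j))]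
def Rfull (A : List Int) : Nat → List Int
  | 0 => row0 A (A.length - 1)
  | j + 1 => rowN A (Rfull A j) (j + 1) (A.length - 1)

theorem mx_eq (L : List Int) : (PySem.List.max? L (fun y => y)).getD 0 = mx L := by
  cases L with
  | nil => simp [mx, PySem.List.max?]
  | cons x t => rw [PySem.List.max?_id_cons]; rfl

theorem length_row0 (A : List Int) (i : Nat) : (row0 A i).length = i + 1 := by
  induction i with
  | zero => simp [row0]
  | succ i ih => simp [row0, ih]

theorem length_rowN (A : List Int) (p : List Int) (j i : Nat) : (rowN A p j i).length = i + 1 := by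
  induction i with
  | zero => simp [rowN]
  | succ i ih => simp [rowN, ih]

theorem row0_ne_nil (A : List Int) (i : Nat) : row0 A i ≠ [] := by
  have := length_row0 A i; intro h; simp [h] at this

theorem rowN_ne_nil (A : List Int) (p : List Int) (j i : Nat) : rowN A p j i ≠ [] := by
  have := length_rowN A p j i; intro h; simp [h] at this

-- B's first loop builds the prefix-sum row
theorem B1 (A : List Int) (m : Nat) :
    (PySem.List.pyRange 1 ((m : Int) + 1) 1).foldl
      (fun p i => p ++ [PySem.List.pyGetD p (-1) 0 + PySem.List.pyGetD A i 0])
      [PySem.List.pyGetD A 0 0] = row0 A m := by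
  induction m with
  | zero => simp [PySem.List.pyRange_one_eq_nil, row0, aN, PySem.List.pyGetD_zero]
  | succ m ih =>
    have h1 : (1 : Int) ≤ (m : Int) + 1 := by omega
    have : ((m + 1 : Nat) : Int) + 1 = ((m : Int) + 1) + 1 := by push_cast; ring
    rw [this, PySem.List.pyRange_one_succ_right h1, List.foldl_append, ih]
    simp only [List.foldl]
    rw [PySem.List.pyGetD_neg_one (row0 A m) 0 (row0_ne_nil A m)]
    have h2 : ((m : Int) + 1) = ((m + 1 : Nat) : Int) := by push_cast; ring
    rw [h2, PySem.List.pyGetD_natCast]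
    show row0 A m ++ _ = row0 A (m + 1)
    rw [row0]
    congr 1
    simp [List.getLastD_eq_getLast?, List.getLast?_eq_some_getLast (row0_ne_nil A m), aN]

-- ===== A side: solution computes Rfull =====

theorem set_append_length {α : Type} (xs ys : List α) (y v : α) :
    (xs ++ y :: ys).set xs.length v = xs ++ v :: ys := by
  induction xs with
  | nil => rfl
  | cons x xs ih => simp [ih]

theorem mx_eq_max? (L : List Int) (h : L ≠ []) : L.max? = some (mx L) := by
  cases L with
  | nil => exact absurd rfl h
  | cons x t => rw [List.max?_cons']; rfl

theorem mx_map_add (L : List Int) (c : Int) (h : L ≠ []) :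
    mx (L.map (fun x => x + c)) = mx L + c := by
  cases L with
  | nil => exact absurd rfl h
  | cons x t =>
    show List.foldl max (x + c) (t.map (fun x => x + c)) = t.foldl max x + c
    clear h
    induction t generalizing x with
    | nil => rfl
    | cons y t ih => simp only [List.map, List.foldl, max_add_add_right]; exact ih (max x y)

theorem drop_eq_map_range (L : List Int) (d : Nat) (hd : d ≤ L.length) :
    L.drop d = (List.range (L.length - d)).map (fun t => L.getD (d + t) 0) := by
  apply List.ext_getElem
  · simp
  · intro k h1 h2
    have hk : k < L.length - d := by simpa using h1
    simp only [List.getElem_drop, List.getElem_map, List.getElem_range]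
    rw [List.getD_eq_getElem _ _ (by omega)]

theorem getD_append_left (l l' : List Int) (m : Nat) (d : Int) (h : m < l.length) :
    (l ++ l').getD m d = l.getD m d := List.getD_append l l' d m h

theorem getD_last (L : List Int) (h : L ≠ []) : L.getD (L.length - 1) 0 = L.getLastD 0 := by
  have hl : 0 < L.length := List.length_pos_of_ne_nil h
  rw [List.getD_eq_getElem _ _ (by omega), ← List.getLast_eq_getElem h,
    List.getLastD_eq_getLast?, List.getLast?_eq_some_getLast h]
  rfl

theorem rowN_getD_stable (A : List Int) (p : List Int) (j q i i' : Nat)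
    (hq : q ≤ i) (hi : i ≤ i') :
    (rowN A p j i').getD q 0 = (rowN A p j i).getD q 0 := by
  induction i' with
  | zero => have : i = 0 := by omega
            subst this; rfl
  | succ i' ih =>
    rcases Nat.lt_or_ge i (i' + 1) with hlt | hge
    · rw [rowN, getD_append_left _ _ _ _ (by rw [length_rowN]; omega)]
      exact ih (by omega)
    · have : i = i' + 1 := by omega
      subst this; rfl

theorem row0_getD_zero (A : List Int) (i : Nat) : (row0 A i).getD 0 0 = aN A 0 := by
  induction i with
  | zero => rfl
  | succ i ih => rw [row0, getD_append_left _ _ _ _ (by rw [length_row0]; omega)]; exact ih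

theorem rowN_getD_zero (A : List Int) (p : List Int) (j i : Nat) :
    (rowN A p j i).getD 0 0 = p.getD 0 0 := by
  induction i with
  | zero => rfl
  | succ i ih => rw [rowN, getD_append_left _ _ _ _ (by rw [length_rowN]; omega)]; exact ih

theorem Rfull_getD_zero (A : List Int) (t : Nat) : (Rfull A t).getD 0 0 = aN A 0 := by
  induction t with
  | zero => exact row0_getD_zero A _
  | succ t ih => rw [Rfull, rowN_getD_zero]; exact ih

theorem L1 (A : List Int) (hn : 1 ≤ A.length) (m : Nat) (hm : m ≤ A.length - 1) :
    (PySem.List.pyRange 1 ((m : Int) + 1) 1).foldl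
      (fun dp i => dSet dp 0 i (dGet dp 0 (i - 1) + aIdx A i))
      (List.replicate 6 (List.replicate A.length (aN A 0))) =
    (row0 A m ++ List.replicate (A.length - 1 - m) (aN A 0)) ::
      List.replicate 5 (List.replicate A.length (aN A 0)) := by
  induction m with
  | zero =>
    rw [PySem.List.pyRange_one_eq_nil (by omega)]
    simp only [List.foldl]
    show List.replicate 6 _ = _
    rw [show (6 : Nat) = 5 + 1 from rfl, List.replicate_succ]
    congr 1
    show List.replicate A.length (aN A 0) = [aN A 0] ++ List.replicate (A.length - 1 - 0) (aN A 0)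
    rw [show A.length = (A.length - 1) + 1 by omega, List.replicate_succ]
    simp
  | succ m ih =>
    have hm' : m ≤ A.length - 1 := by omega
    have : ((m + 1 : Nat) : Int) + 1 = ((m : Int) + 1) + 1 := by push_cast; ring
    rw [this, PySem.List.pyRange_one_succ_right (by omega), List.foldl_append, ih hm']
    simp only [List.foldl]
    rw [show (5 : Nat) = 4 + 1 from rfl, List.replicate_succ]
    unfold dSet dGet
    rw [PySem.List.pyGetD_zero_cons,
      PySem.List.pySetD_of_nonneg _ _ (by omega : (0:Int) ≤ 0)]
    simp only [Int.toNat_zero, List.set_cons_zero]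
    have hidx : (m : Int) + 1 - 1 = ((m : Nat) : Int) := by ring
    rw [hidx, PySem.List.pyGetD_natCast]
    have hidx2 : (m : Int) + 1 = ((m + 1 : Nat) : Int) := by push_cast; ring
    rw [hidx2, PySem.List.pySetD_natCast]
    unfold aIdx
    rw [PySem.List.pyGetD_natCast]
    congr 1
    · have hlen : m < (row0 A m).length := by rw [length_row0]; omega
      rw [List.getD_append _ _ _ _ hlen]
      have hrep : List.replicate (A.length - 1 - m) (aN A 0) =
          aN A 0 :: List.replicate (A.length - 1 - (m + 1)) (aN A 0) := by
        rw [show A.length - 1 - m = (A.length - 1 - (m + 1)) + 1 by omega, List.replicate_succ]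
      have hset := set_append_length (row0 A m) (List.replicate (A.length - 1 - (m + 1)) (aN A 0))
        (aN A 0) ((row0 A m).getD m 0 + A.getD (m + 1) 0)
      rw [length_row0] at hset
      rw [hrep, hset]
      have : (row0 A m).getD m 0 = (row0 A m).getLastD 0 := by
        have := getD_last (row0 A m) (row0_ne_nil A m)
        rwa [length_row0, Nat.add_sub_cancel] at this
      rw [this]
      show _ = row0 A (m + 1) ++ _
      rw [row0]
      simp [aN]

def G (A : List Int) (t m : Nat) : List Int :=
  rowN A (Rfull A t) (t + 1) m ++ List.replicate (A.length - 1 - m) (aN A 0)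
def F (A : List Int) (m : Nat) : List (List Int) :=
  [row0 A (A.length - 1), G A 0 m, G A 1 m, G A 2 m, G A 3 m, G A 4 m]

theorem G_getD (A : List Int) (t m q : Nat) (hq : q ≤ m) (hm : m ≤ A.length - 1) :
    (G A t m).getD q 0 = (Rfull A (t + 1)).getD q 0 := by
  unfold G
  rw [getD_append_left _ _ _ _ (by rw [length_rowN]; omega)]
  show _ = (rowN A (Rfull A t) (t + 1) (A.length - 1)).getD q 0
  exact (rowN_getD_stable A _ (t + 1) q m (A.length - 1) hq hm).symm

theorem mx_eq_of_members (M1 M2 : List Int) (h1 : M1 ≠ []) (h2 : M2 ≠ [])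
    (hm : ∀ x, x ∈ M1 ↔ x ∈ M2) : mx M1 = mx M2 := by
  have e1 := mx_eq_max? M1 h1
  have e2 := mx_eq_max? M2 h2
  rw [List.max?_eq_some_iff] at e1 e2
  have a1 : mx M1 ≤ mx M2 := e2.2 _ ((hm _).mp e1.1)
  have a2 : mx M2 ≤ mx M1 := e1.2 _ ((hm _).mpr e2.1)
  omega

theorem setG (A : List Int) (t m : Nat) (hm : m + 1 ≤ A.length - 1) (v : Int)
    (hv : v = if m + 1 ≤ t + 1 then (Rfull A t).getD (m + 1) 0
              else aN A (m + 1) + mx ((rowN A (Rfull A t) (t + 1) m).drop (m - (t + 1)))) :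
    PySem.List.pySetD (G A t m) ((m : Int) + 1) v = G A t (m + 1) := by
  have hidx2 : (m : Int) + 1 = ((m + 1 : Nat) : Int) := by push_cast; ring
  rw [hidx2, PySem.List.pySetD_natCast]
  unfold G
  have hrep : List.replicate (A.length - 1 - m) (aN A 0) =
      aN A 0 :: List.replicate (A.length - 1 - (m + 1)) (aN A 0) := by
    rw [show A.length - 1 - m = (A.length - 1 - (m + 1)) + 1 by omega, List.replicate_succ]
  have hset := set_append_length (rowN A (Rfull A t) (t + 1) m)
    (List.replicate (A.length - 1 - (m + 1)) (aN A 0)) (aN A 0) v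
  rw [length_rowN] at hset
  rw [hrep, hset, rowN, hv]
  simp

theorem winval (A : List Int) (t m : Nat) (hmt : t + 1 ≤ m) (_hm : m + 1 ≤ A.length - 1) :
    ((PySem.List.max? ((PySem.List.pyRange 0 (((t + 1 : Nat) : Int) + 1) 1).map
        (fun k => PySem.List.pyGetD (G A t m) (((m : Int) + 1) - k - 1) 0 +
          PySem.List.pyGetD A ((m : Int) + 1) 0)) (fun y => y)).getD 0)
    = aN A (m + 1) + mx ((rowN A (Rfull A t) (t + 1) m).drop (m - (t + 1))) := by
  set j := t + 1 with hj
  set L := rowN A (Rfull A t) j m with hL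
  have hlenL : L.length = m + 1 := length_rowN A _ j m
  have hcast : ((j : Nat) : Int) + 1 = ((j + 1 : Nat) : Int) := by push_cast; ring
  rw [hcast, PySem.List.pyRange_zero_nat]
  rw [List.map_map]
  have hmap : ((List.range (j + 1)).map ((fun k => PySem.List.pyGetD (G A t m) (((m : Int) + 1) - k - 1) 0 + PySem.List.pyGetD A ((m : Int) + 1) 0) ∘ (fun k : Nat => (k : Int))))
      = (List.range (j + 1)).map (fun k : Nat => L.getD (m - k) 0 + A.getD (m + 1) 0) := by
    apply List.map_congr_left
    intro k hk
    rw [List.mem_range] at hk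
    simp only [Function.comp]
    have h1 : ((m : Int) + 1) - (k : Int) - 1 = ((m - k : Nat) : Int) := by
      push_cast [show k ≤ m by omega]; ring
    have h2 : ((m : Int) + 1) = ((m + 1 : Nat) : Int) := by push_cast; ring
    rw [h1, h2, PySem.List.pyGetD_natCast, PySem.List.pyGetD_natCast]
    congr 1
    unfold G
    rw [getD_append_left _ _ _ _ (by simp only [length_rowN]; omega)]
  rw [hmap]
  have hsplit : (List.range (j + 1)).map (fun k : Nat => L.getD (m - k) 0 + A.getD (m + 1) 0)
      = ((List.range (j + 1)).map (fun k : Nat => L.getD (m - k) 0)).map (fun x => x + A.getD (m + 1) 0) := by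
    rw [List.map_map]; rfl
  rw [hsplit, mx_eq, mx_map_add _ _ (by simp)]
  have hdrop : L.drop (m - j) = (List.range (j + 1)).map (fun t' : Nat => L.getD ((m - j) + t') 0) := by
    have := drop_eq_map_range L (m - j) (by omega)
    rwa [hlenL, show m + 1 - (m - j) = j + 1 by omega] at this
  rw [hdrop]
  have hmembers : mx ((List.range (j + 1)).map (fun k : Nat => L.getD (m - k) 0))
      = mx ((List.range (j + 1)).map (fun t' : Nat => L.getD ((m - j) + t') 0)) := by
    apply mx_eq_of_members _ _ (by simp) (by simp)
    intro x
    simp only [List.mem_map, List.mem_range]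
    constructor
    · rintro ⟨k, hk, rfl⟩
      exact ⟨j - k, by omega, by congr 1; omega⟩
    · rintro ⟨t', ht', rfl⟩
      exact ⟨j - t', by omega, by congr 1; omega⟩
  rw [hmembers, Int.add_comm]
  congr 1

theorem rowval_pos (A : List Int) (t m : Nat) (hm : m + 1 ≤ A.length - 1)
    (hc : m + 1 ≤ t + 1) (P : List Int)
    (hP : PySem.List.pyGetD P ((m : Int) + 1) 0 = (Rfull A t).getD (m + 1) 0) :
    PySem.List.pySetD (G A t m) ((m : Int) + 1) (PySem.List.pyGetD P ((m : Int) + 1) 0)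
      = G A t (m + 1) := by
  rw [hP]
  exact setG A t m hm _ (by rw [if_pos hc])

theorem rowval_neg (A : List Int) (t m : Nat) (hm : m + 1 ≤ A.length - 1)
    (hc : t + 1 ≤ m) :
    PySem.List.pySetD (G A t m) ((m : Int) + 1)
      ((PySem.List.max? ((PySem.List.pyRange 0 (((t + 1 : Nat) : Int) + 1) 1).map
        (fun k => PySem.List.pyGetD (G A t m) (((m : Int) + 1) - k - 1) 0 +
          aIdx A ((m : Int) + 1))) (fun y => y)).getD 0)
      = G A t (m + 1) := by
  have hw := winval A t m hc hm
  unfold aIdx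
  rw [hw]
  refine setG A t m hm _ ?_
  rw [if_neg (by omega)]

theorem COL (A : List Int) (m : Nat) (hm : m + 1 ≤ A.length - 1) :
    (PySem.List.pyRange 1 6 1).foldl (fun dp j =>
      if j ≥ (m : Int) + 1 then dSet dp j ((m : Int) + 1) (dGet dp (j - 1) ((m : Int) + 1))
      else dSet dp j ((m : Int) + 1) ((PySem.List.max?
        ((PySem.List.pyRange 0 (j + 1) 1).map
          (fun k => dGet dp j (((m : Int) + 1) - k - 1) + aIdx A ((m : Int) + 1)))
        (fun y => y)).getD 0)) (F A m) = F A (m + 1) := by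
  have hcast : ((m : Int) + 1) = ((m + 1 : Nat) : Int) := by push_cast; ring
  have fetch0 : PySem.List.pyGetD (row0 A (A.length - 1)) ((m : Int) + 1) 0
      = (Rfull A 0).getD (m + 1) 0 := by
    rw [hcast, PySem.List.pyGetD_natCast]; rfl
  have fetch : ∀ t' : Nat, PySem.List.pyGetD (G A t' (m + 1)) ((m : Int) + 1) 0
      = (Rfull A (t' + 1)).getD (m + 1) 0 := by
    intro t'
    rw [hcast, PySem.List.pyGetD_natCast]
    exact G_getD A t' (m + 1) (m + 1) (le_refl _) hm
  rw [show PySem.List.pyRange 1 6 1 = [1, 2, 3, 4, 5] from by decide]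
  simp only [List.foldl]
  show _ = F A (m + 1)
  unfold F
  have s1 : (if (1 : Int) ≥ (m : Int) + 1 then dSet ([row0 A (A.length - 1), G A 0 m, G A 1 m, G A 2 m, G A 3 m, G A 4 m]) 1 ((m : Int) + 1) (dGet ([row0 A (A.length - 1), G A 0 m, G A 1 m, G A 2 m, G A 3 m, G A 4 m]) (1 - 1) ((m : Int) + 1))
      else dSet ([row0 A (A.length - 1), G A 0 m, G A 1 m, G A 2 m, G A 3 m, G A 4 m]) 1 ((m : Int) + 1)
        ((PySem.List.max? (List.map (fun k => dGet ([row0 A (A.length - 1), G A 0 m, G A 1 m, G A 2 m, G A 3 m, G A 4 m]) 1 ((m : Int) + 1 - k - 1) + aIdx A ((m : Int) + 1))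
          (PySem.List.pyRange 0 (1 + 1))) fun y => y).getD 0)) = [row0 A (A.length - 1), G A 0 (m + 1), G A 1 m, G A 2 m, G A 3 m, G A 4 m] := by
    by_cases hc : m + 1 ≤ 0 + 1
    · rw [if_pos (by omega : (1 : Int) ≥ (m : Int) + 1)]
      exact congrArg (fun r => [row0 A (A.length - 1), r, G A 1 m, G A 2 m, G A 3 m, G A 4 m]) (rowval_pos A 0 m hm hc (row0 A (A.length - 1)) (fetch0))
    · rw [if_neg (by omega)]
      exact congrArg (fun r => [row0 A (A.length - 1), r, G A 1 m, G A 2 m, G A 3 m, G A 4 m]) (rowval_neg A 0 m hm (by omega))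
  have s2 : (if (2 : Int) ≥ (m : Int) + 1 then dSet ([row0 A (A.length - 1), G A 0 (m + 1), G A 1 m, G A 2 m, G A 3 m, G A 4 m]) 2 ((m : Int) + 1) (dGet ([row0 A (A.length - 1), G A 0 (m + 1), G A 1 m, G A 2 m, G A 3 m, G A 4 m]) (2 - 1) ((m : Int) + 1))
      else dSet ([row0 A (A.length - 1), G A 0 (m + 1), G A 1 m, G A 2 m, G A 3 m, G A 4 m]) 2 ((m : Int) + 1)
        ((PySem.List.max? (List.map (fun k => dGet ([row0 A (A.length - 1), G A 0 (m + 1), G A 1 m, G A 2 m, G A 3 m, G A 4 m]) 2 ((m : Int) + 1 - k - 1) + aIdx A ((m : Int) + 1))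
          (PySem.List.pyRange 0 (2 + 1))) fun y => y).getD 0)) = [row0 A (A.length - 1), G A 0 (m + 1), G A 1 (m + 1), G A 2 m, G A 3 m, G A 4 m] := by
    by_cases hc : m + 1 ≤ 1 + 1
    · rw [if_pos (by omega : (2 : Int) ≥ (m : Int) + 1)]
      exact congrArg (fun r => [row0 A (A.length - 1), G A 0 (m + 1), r, G A 2 m, G A 3 m, G A 4 m]) (rowval_pos A 1 m hm hc (G A 0 (m + 1)) (fetch 0))
    · rw [if_neg (by omega)]
      exact congrArg (fun r => [row0 A (A.length - 1), G A 0 (m + 1), r, G A 2 m, G A 3 m, G A 4 m]) (rowval_neg A 1 m hm (by omega))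
  have s3 : (if (3 : Int) ≥ (m : Int) + 1 then dSet ([row0 A (A.length - 1), G A 0 (m + 1), G A 1 (m + 1), G A 2 m, G A 3 m, G A 4 m]) 3 ((m : Int) + 1) (dGet ([row0 A (A.length - 1), G A 0 (m + 1), G A 1 (m + 1), G A 2 m, G A 3 m, G A 4 m]) (3 - 1) ((m : Int) + 1))
      else dSet ([row0 A (A.length - 1), G A 0 (m + 1), G A 1 (m + 1), G A 2 m, G A 3 m, G A 4 m]) 3 ((m : Int) + 1)
        ((PySem.List.max? (List.map (fun k => dGet ([row0 A (A.length - 1), G A 0 (m + 1), G A 1 (m + 1), G A 2 m, G A 3 m, G A 4 m]) 3 ((m : Int) + 1 - k - 1) + aIdx A ((m : Int) + 1))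
          (PySem.List.pyRange 0 (3 + 1))) fun y => y).getD 0)) = [row0 A (A.length - 1), G A 0 (m + 1), G A 1 (m + 1), G A 2 (m + 1), G A 3 m, G A 4 m] := by
    by_cases hc : m + 1 ≤ 2 + 1
    · rw [if_pos (by omega : (3 : Int) ≥ (m : Int) + 1)]
      exact congrArg (fun r => [row0 A (A.length - 1), G A 0 (m + 1), G A 1 (m + 1), r, G A 3 m, G A 4 m]) (rowval_pos A 2 m hm hc (G A 1 (m + 1)) (fetch 1))
    · rw [if_neg (by omega)]
      exact congrArg (fun r => [row0 A (A.length - 1), G A 0 (m + 1), G A 1 (m + 1), r, G A 3 m, G A 4 m]) (rowval_neg A 2 m hm (by omega))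
  have s4 : (if (4 : Int) ≥ (m : Int) + 1 then dSet ([row0 A (A.length - 1), G A 0 (m + 1), G A 1 (m + 1), G A 2 (m + 1), G A 3 m, G A 4 m]) 4 ((m : Int) + 1) (dGet ([row0 A (A.length - 1), G A 0 (m + 1), G A 1 (m + 1), G A 2 (m + 1), G A 3 m, G A 4 m]) (4 - 1) ((m : Int) + 1))
      else dSet ([row0 A (A.length - 1), G A 0 (m + 1), G A 1 (m + 1), G A 2 (m + 1), G A 3 m, G A 4 m]) 4 ((m : Int) + 1)
        ((PySem.List.max? (List.map (fun k => dGet ([row0 A (A.length - 1), G A 0 (m + 1), G A 1 (m + 1), G A 2 (m + 1), G A 3 m, G A 4 m]) 4 ((m : Int) + 1 - k - 1) + aIdx A ((m : Int) + 1))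
          (PySem.List.pyRange 0 (4 + 1))) fun y => y).getD 0)) = [row0 A (A.length - 1), G A 0 (m + 1), G A 1 (m + 1), G A 2 (m + 1), G A 3 (m + 1), G A 4 m] := by
    by_cases hc : m + 1 ≤ 3 + 1
    · rw [if_pos (by omega : (4 : Int) ≥ (m : Int) + 1)]
      exact congrArg (fun r => [row0 A (A.length - 1), G A 0 (m + 1), G A 1 (m + 1), G A 2 (m + 1), r, G A 4 m]) (rowval_pos A 3 m hm hc (G A 2 (m + 1)) (fetch 2))
    · rw [if_neg (by omega)]
      exact congrArg (fun r => [row0 A (A.length - 1), G A 0 (m + 1), G A 1 (m + 1), G A 2 (m + 1), r, G A 4 m]) (rowval_neg A 3 m hm (by omega))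
  have s5 : (if (5 : Int) ≥ (m : Int) + 1 then dSet ([row0 A (A.length - 1), G A 0 (m + 1), G A 1 (m + 1), G A 2 (m + 1), G A 3 (m + 1), G A 4 m]) 5 ((m : Int) + 1) (dGet ([row0 A (A.length - 1), G A 0 (m + 1), G A 1 (m + 1), G A 2 (m + 1), G A 3 (m + 1), G A 4 m]) (5 - 1) ((m : Int) + 1))
      else dSet ([row0 A (A.length - 1), G A 0 (m + 1), G A 1 (m + 1), G A 2 (m + 1), G A 3 (m + 1), G A 4 m]) 5 ((m : Int) + 1)
        ((PySem.List.max? (List.map (fun k => dGet ([row0 A (A.length - 1), G A 0 (m + 1), G A 1 (m + 1), G A 2 (m + 1), G A 3 (m + 1), G A 4 m]) 5 ((m : Int) + 1 - k - 1) + aIdx A ((m : Int) + 1))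
          (PySem.List.pyRange 0 (5 + 1))) fun y => y).getD 0)) = [row0 A (A.length - 1), G A 0 (m + 1), G A 1 (m + 1), G A 2 (m + 1), G A 3 (m + 1), G A 4 (m + 1)] := by
    by_cases hc : m + 1 ≤ 4 + 1
    · rw [if_pos (by omega : (5 : Int) ≥ (m : Int) + 1)]
      exact congrArg (fun r => [row0 A (A.length - 1), G A 0 (m + 1), G A 1 (m + 1), G A 2 (m + 1), G A 3 (m + 1), r]) (rowval_pos A 4 m hm hc (G A 3 (m + 1)) (fetch 3))
    · rw [if_neg (by omega)]
      exact congrArg (fun r => [row0 A (A.length - 1), G A 0 (m + 1), G A 1 (m + 1), G A 2 (m + 1), G A 3 (m + 1), r]) (rowval_neg A 4 m hm (by omega))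
  rw [s1, s2, s3, s4, s5]

theorem L2 (A : List Int) (m : Nat) (hm : m ≤ A.length - 1) :
    (PySem.List.pyRange 1 ((m : Int) + 1) 1).foldl (fun dp i =>
      (PySem.List.pyRange 1 6 1).foldl (fun dp j =>
        if j ≥ i then dSet dp j i (dGet dp (j - 1) i)
        else dSet dp j i ((PySem.List.max?
          ((PySem.List.pyRange 0 (j + 1) 1).map
            (fun k => dGet dp j (i - k - 1) + aIdx A i))
          (fun y => y)).getD 0)) dp) (F A 0) = F A m := by
  induction m with
  | zero =>
    rw [show PySem.List.pyRange 1 (((0 : Nat) : Int) + 1) 1 = ([] : List Int) from by decide]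
    rfl
  | succ m ih =>
    have h9 : ((m + 1 : Nat) : Int) + 1 = ((m : Int) + 1) + 1 := by push_cast; ring
    rw [h9, PySem.List.pyRange_one_succ_right (a := 1) (by omega), List.foldl_append, ih (by omega)]
    simp only [List.foldl]
    exact COL A m hm

theorem F_zero (A : List Int) (hn : 1 ≤ A.length) :
    F A 0 = (row0 A (A.length - 1) ++ List.replicate (A.length - 1 - (A.length - 1)) (aN A 0)) ::
      List.replicate 5 (List.replicate A.length (aN A 0)) := by
  have hG : ∀ t, G A t 0 = List.replicate A.length (aN A 0) := by
    intro t
    unfold G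
    rw [show rowN A (Rfull A t) (t + 1) 0 = [(Rfull A t).getD 0 0] from rfl, Rfull_getD_zero,
      show A.length = (A.length - 1) + 1 by omega, List.replicate_succ]
    simp
  unfold F
  rw [hG 0, hG 1, hG 2, hG 3, hG 4]
  simp [List.replicate_succ]

theorem solution_eq (A : List Int) (h : A ≠ []) :
    solution A = (Rfull A 5).getLastD 0 := by
  have hn : 1 ≤ A.length := List.length_pos_of_ne_nil h
  have hcast : (PySem.List.len A) = (((A.length - 1 : Nat) : Int) + 1) := by
    rw [PySem.List.len_eq]; omega
  have htn : ((((A.length - 1 : Nat) : Int)) + 1).toNat = A.length := by omega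
  have ha0 : aIdx A 0 = aN A 0 := by
    unfold aIdx aN; rw [PySem.List.pyGetD_zero]
  simp only [solution, hcast, htn, ha0]
  rw [L1 A hn (A.length - 1) (le_refl _), ← F_zero A hn, L2 A (A.length - 1) (le_refl _)]
  have hne : Rfull A 5 ≠ [] := by
    intro he
    have := length_rowN A (Rfull A 4) 5 (A.length - 1)
    rw [show rowN A (Rfull A 4) 5 (A.length - 1) = Rfull A 5 from rfl, he] at this
    simp at this
  unfold dGet
  rw [show PySem.List.pyGetD (F A (A.length - 1)) (-1) [] = G A 4 (A.length - 1) from rfl,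
    show G A 4 (A.length - 1) = Rfull A 5 ++ List.replicate (A.length - 1 - (A.length - 1)) (aN A 0) from rfl,
    Nat.sub_self, List.replicate_zero, List.append_nil,
    PySem.List.pyGetD_neg_one (Rfull A 5) 0 hne,
    List.getLastD_eq_getLast?, List.getLast?_eq_some_getLast hne]
  rfl

-- ===== B side: Nat-level mirror of the deque loop =====

def evictN (L : Nat) : List (Nat × Int) → List (Nat × Int)
  | [] => []
  | x :: t => if x.1 < L then evictN L t else x :: t

def trimN (v : Int) : List (Nat × Int) → List (Nat × Int)
  | [] => []
  | x :: t => if x.2 ≤ v then trimN v t else x :: t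

def dstep (A p : List Int) (j : Nat) (st : List Int × List (Nat × Int)) (i : Nat) :
    List Int × List (Nat × Int) :=
  let vd := if i ≤ j then (p.getD i 0, st.2)
    else (aN A i + ((evictN (i - j - 1) st.2).headD (0, 0)).2, evictN (i - j - 1) st.2)
  (st.1 ++ [vd.1], (trimN vd.1 vd.2.reverse).reverse ++ [(i, vd.1)])

def dstate (A p : List Int) (j : Nat) : Nat → List Int × List (Nat × Int)
  | 0 => dstep A p j ([], []) 0
  | i + 1 => dstep A p j (dstate A p j i) (i + 1)

def pvC : (Nat × Int) → (Int × Int) := fun x => ((x.1 : Int), x.2)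

-- deque invariant after processing cells 0..i of row j
def DqInv (A p : List Int) (j i : Nat) (dq : List (Nat × Int)) : Prop :=
  dq.getLast? = some (i, (rowN A p j i).getD i 0)
  ∧ List.Pairwise (fun a b : Nat × Int => a.1 < b.1 ∧ b.2 < a.2) dq
  ∧ (∀ x ∈ dq, x.1 ≤ i ∧ x.2 = (rowN A p j i).getD x.1 0 ∧ (j + 1 ≤ i → i - (j + 1) ≤ x.1))
  ∧ (∀ q : Nat, q ≤ i → (j + 1 ≤ i → i - (j + 1) ≤ q) →
      ∃ x ∈ dq, q ≤ x.1 ∧ (rowN A p j i).getD q 0 ≤ x.2)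

-- ===== B-side correctness: deque invariant and sliding-window maximum =====

theorem getD_append_length (xs : List Int) (w : Int) (d : Int) :
    (xs ++ [w]).getD xs.length d = w := by
  rw [List.getD_eq_getElem _ _ (by simp)]
  simp

theorem evict_drop (L : Nat) (l : List (Nat × Int)) : ∃ k, evictN L l = l.drop k := by
  induction l with
  | nil => exact ⟨0, rfl⟩
  | cons x t ih =>
    by_cases h : x.1 < L
    · obtain ⟨k, hk⟩ := ih
      exact ⟨k + 1, by simp [evictN, h, hk]⟩
    · exact ⟨0, by simp [evictN, h]⟩

theorem evict_keep (L : Nat) (l : List (Nat × Int)) (x : Nat × Int)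
    (hx : x ∈ l) (hL : L ≤ x.1) : x ∈ evictN L l := by
  induction l with
  | nil => simp at hx
  | cons y t ih =>
    by_cases h : y.1 < L
    · rw [show evictN L (y :: t) = evictN L t from by simp [evictN, h]]
      rcases List.mem_cons.mp hx with rfl | hx'
      · omega
      · exact ih hx'
    · rw [show evictN L (y :: t) = y :: t from by simp [evictN, h]]
      exact hx

theorem evict_head_ge (L : Nat) (l : List (Nat × Int)) (y : Nat × Int) (t : List (Nat × Int))
    (h : evictN L l = y :: t) : L ≤ y.1 := by
  induction l with
  | nil => simp [evictN] at h
  | cons z s ih =>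
    by_cases hz : z.1 < L
    · rw [show evictN L (z :: s) = evictN L s from by simp [evictN, hz]] at h
      exact ih h
    · rw [show evictN L (z :: s) = z :: s from by simp [evictN, hz]] at h
      cases h; omega

theorem trim_drop (v : Int) (l : List (Nat × Int)) : ∃ k, trimN v l = l.drop k := by
  induction l with
  | nil => exact ⟨0, rfl⟩
  | cons x t ih =>
    by_cases h : x.2 ≤ v
    · obtain ⟨k, hk⟩ := ih
      exact ⟨k + 1, by simp [trimN, h, hk]⟩
    · exact ⟨0, by simp [trimN, h]⟩

theorem trim_dropped_le (v : Int) (l : List (Nat × Int)) (x : Nat × Int)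
    (hx : x ∈ l) (hnx : x ∉ trimN v l) : x.2 ≤ v := by
  induction l with
  | nil => simp at hx
  | cons y t ih =>
    by_cases h : y.2 ≤ v
    · rw [show trimN v (y :: t) = trimN v t from by simp [trimN, h]] at hnx
      rcases List.mem_cons.mp hx with rfl | hx'
      · exact h
      · exact ih hx' hnx
    · rw [show trimN v (y :: t) = y :: t from by simp [trimN, h]] at hnx
      exact absurd hx hnx

theorem trim_mem_gt (v : Int) (l : List (Nat × Int))
    (hp : List.Pairwise (fun a b : Nat × Int => a.2 < b.2) l) (x : Nat × Int)
    (hx : x ∈ trimN v l) : v < x.2 := by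
  induction l with
  | nil => simp [trimN] at hx
  | cons y t ih =>
    by_cases h : y.2 ≤ v
    · rw [show trimN v (y :: t) = trimN v t from by simp [trimN, h]] at hx
      exact ih (List.Pairwise.sublist (List.sublist_cons_self y t) hp) hx
    · rw [show trimN v (y :: t) = y :: t from by simp [trimN, h]] at hx
      rcases List.mem_cons.mp hx with rfl | hx'
      · omega
      · have := (List.pairwise_cons.mp hp).1 x hx'
        omega

theorem evict_mem_ge (L : Nat) (l : List (Nat × Int))
    (hp : List.Pairwise (fun a b : Nat × Int => a.1 < b.1) l) (x : Nat × Int)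
    (hx : x ∈ evictN L l) : L ≤ x.1 := by
  induction l with
  | nil => simp [evictN] at hx
  | cons y t ih =>
    by_cases h : y.1 < L
    · rw [show evictN L (y :: t) = evictN L t from by simp [evictN, h]] at hx
      exact ih (List.Pairwise.sublist (List.sublist_cons_self y t) hp) hx
    · rw [show evictN L (y :: t) = y :: t from by simp [evictN, h]] at hx
      rcases List.mem_cons.mp hx with rfl | hx'
      · omega
      · have := (List.pairwise_cons.mp hp).1 x hx'
        omega

theorem front_max (A p : List Int) (j i : Nat) (hji : j ≤ i) (dq : List (Nat × Int))
    (hI : DqInv A p j i dq) :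
    ((evictN (i - j) dq).headD (0, 0)).2 = mx ((rowN A p j i).drop (i - j)) := by
  obtain ⟨hlast, hpw, hmem, hcov⟩ := hI
  set R := rowN A p j i with hR
  have hRlen : R.length = i + 1 := length_rowN A p j i
  have hlastmem : ((i, R.getD i 0) : Nat × Int) ∈ dq := by
    have := List.mem_of_getLast? (l := dq) (a := (i, R.getD i 0))
    exact this hlast
  have hin : ((i, R.getD i 0) : Nat × Int) ∈ evictN (i - j) dq :=
    evict_keep _ _ _ hlastmem (by omega)
  cases hE : evictN (i - j) dq with
  | nil => rw [hE] at hin; simp at hin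
  | cons y t =>
    rw [hE] at hin
    obtain ⟨k, hk⟩ := evict_drop (i - j) dq
    have hEsub : List.Sublist (evictN (i - j) dq) dq := hk ▸ List.drop_sublist k dq
    have hymem : y ∈ dq := hEsub.subset (by rw [hE]; exact List.mem_cons_self ..)
    obtain ⟨hy1, hy2, _⟩ := hmem y hymem
    have hyL : i - j ≤ y.1 := evict_head_ge _ _ _ _ hE
    have hWmap : R.drop (i - j) =
        (List.range (j + 1)).map (fun t => R.getD ((i - j) + t) 0) := by
      have := drop_eq_map_range R (i - j) (by omega)
      rwa [hRlen, show i + 1 - (i - j) = j + 1 by omega] at this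
    have hWne : R.drop (i - j) ≠ [] := by
      rw [hWmap]; simp
    have hmax := mx_eq_max? _ hWne
    rw [List.max?_eq_some_iff] at hmax
    obtain ⟨hmxmem, hmxle⟩ := hmax
    have hyW : y.2 ∈ R.drop (i - j) := by
      rw [hWmap]
      refine List.mem_map.mpr ⟨y.1 - (i - j), List.mem_range.mpr (by omega), ?_⟩
      rw [show (i - j) + (y.1 - (i - j)) = y.1 by omega, ← hy2]
    have hymx : y.2 ≤ mx (R.drop (i - j)) := hmxle _ hyW
    obtain ⟨k0, hk0, hval⟩ := List.getElem_of_mem hmxmem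
    have hk0' : k0 < j + 1 := by
      have := hk0
      rw [List.length_drop, hRlen] at this
      omega
    set q := (i - j) + k0 with hq
    have hvq : R.getD q 0 = mx (R.drop (i - j)) := by
      rw [List.getD_eq_getElem _ _ (by rw [hRlen]; omega), ← hval, List.getElem_drop]
    have hcq := hcov q (by omega) (by omega)
    obtain ⟨x, hxdq, hqx, hle⟩ := hcq
    rw [hvq] at hle
    have hxE : x ∈ evictN (i - j) dq := evict_keep _ _ _ hxdq (by omega)
    rw [hE] at hxE
    have hxy : mx (R.drop (i - j)) ≤ y.2 := by
      rcases List.mem_cons.mp hxE with rfl | hxt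
      · exact hle
      · have hpwE : List.Pairwise (fun a b : Nat × Int => a.1 < b.1 ∧ b.2 < a.2) (y :: t) :=
          hE ▸ List.Pairwise.sublist hEsub hpw
        have := (List.pairwise_cons.mp hpwE).1 x hxt
        omega
    show y.2 = mx (R.drop (i - j))
    omega

theorem push_inv (A p : List Int) (j i : Nat) (dq dq2 : List (Nat × Int)) (v : Int)
    (hI : DqInv A p j i dq)
    (hdrop : ∃ k, dq2 = dq.drop k)
    (hkeep : ∀ x ∈ dq, i - j ≤ x.1 → x ∈ dq2)
    (hmin : j ≤ i → ∀ x ∈ dq2, i - j ≤ x.1)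
    (hv : rowN A p j (i + 1) = rowN A p j i ++ [v]) :
    DqInv A p j (i + 1) ((trimN v dq2.reverse).reverse ++ [(i + 1, v)]) := by
  obtain ⟨hlast, hpw, hmem, hcov⟩ := hI
  set R := rowN A p j i with hR
  have hRlen : R.length = i + 1 := length_rowN A p j i
  have hR'len : (rowN A p j (i + 1)).length = i + 2 := length_rowN A p j (i + 1)
  have hgetv : (rowN A p j (i + 1)).getD (i + 1) 0 = v := by
    rw [hv, ← hRlen]; exact getD_append_length R v 0
  have hgetold : ∀ q : Nat, q ≤ i → (rowN A p j (i + 1)).getD q 0 = R.getD q 0 := by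
    intro q hq
    rw [hv]; exact getD_append_left R [v] q 0 (by omega)
  obtain ⟨k, hk⟩ := hdrop
  have hdq2sub : List.Sublist dq2 dq := hk ▸ List.drop_sublist k dq
  have hpw2 : List.Pairwise (fun a b : Nat × Int => a.1 < b.1 ∧ b.2 < a.2) dq2 :=
    List.Pairwise.sublist hdq2sub hpw
  set T := (trimN v dq2.reverse).reverse with hT
  have hTsub : List.Sublist T dq2 := by
    obtain ⟨k2, hk2⟩ := trim_drop v dq2.reverse
    rw [hT, hk2]
    have := (List.drop_sublist k2 dq2.reverse).reverse
    rwa [List.reverse_reverse] at this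
  have hTmem : ∀ x ∈ T, x ∈ dq := fun x hx => hdq2sub.subset (hTsub.subset hx)
  have hTgt : ∀ x ∈ T, v < x.2 := by
    intro x hx
    have hx' : x ∈ trimN v dq2.reverse := by
      rw [hT] at hx; exact (List.mem_reverse).mp hx
    refine trim_mem_gt v dq2.reverse ?_ x hx'
    rw [List.pairwise_reverse]
    exact hpw2.imp (fun h => h.2)
  refine ⟨?_, ?_, ?_, ?_⟩
  · rw [List.getLast?_concat, hgetv]
  · rw [List.pairwise_append]
    refine ⟨List.Pairwise.sublist hTsub hpw2, List.pairwise_singleton _ _, ?_⟩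
    intro x hx y hy
    rw [List.mem_singleton] at hy
    subst hy
    exact ⟨by have := (hmem x (hTmem x hx)).1; omega, hTgt x hx⟩
  · intro x hx
    rcases List.mem_append.mp hx with hxT | hxs
    · obtain ⟨h1, h2, _⟩ := hmem x (hTmem x hxT)
      refine ⟨by omega, by rw [hgetold x.1 h1]; exact h2, ?_⟩
      intro hji
      have hx2 : x ∈ dq2 := hTsub.subset hxT
      have := hmin (by omega) x hx2
      omega
    · rw [List.mem_singleton] at hxs
      subst hxs
      exact ⟨le_refl _, by rw [hgetv], by omega⟩
  · intro q hq hlb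
    rcases Nat.lt_or_ge q (i + 1) with hqi | hqi
    · have hqI : q ≤ i := by omega
      have hcq := hcov q hqI (by intro h; have := hlb (by omega); omega)
      obtain ⟨x, hxdq, hqx, hle⟩ := hcq
      have hx2 : x ∈ dq2 := by
        refine hkeep x hxdq ?_
        rcases Nat.lt_or_ge i j with h | h
        · omega
        · have := hlb (by omega)
          omega
      by_cases hxT : x ∈ T
      · exact ⟨x, List.mem_append.mpr (Or.inl hxT), hqx, by rw [hgetold q hqI]; exact hle⟩
      · have hxle : x.2 ≤ v := by
          refine trim_dropped_le v dq2.reverse x ((List.mem_reverse).mpr hx2) ?_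
          intro hc
          exact hxT (by rw [hT]; exact (List.mem_reverse).mpr hc)
        refine ⟨(i + 1, v), List.mem_append.mpr (Or.inr (List.mem_singleton.mpr rfl)), by omega, ?_⟩
        rw [hgetold q hqI]
        calc (rowN A p j i).getD q 0 ≤ x.2 := hle
          _ ≤ v := hxle
    · have hq1 : q = i + 1 := by omega
      subst hq1
      exact ⟨(i + 1, v), List.mem_append.mpr (Or.inr (List.mem_singleton.mpr rfl)),
        le_refl _, by rw [hgetv]⟩

theorem dstep_main (A p : List Int) (j : Nat) (i : Nat)
    (st : List Int × List (Nat × Int))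
    (h1 : st.1 = rowN A p j i) (h2 : DqInv A p j i st.2) :
    (dstep A p j st (i + 1)).1 = rowN A p j (i + 1) ∧
      DqInv A p j (i + 1) (dstep A p j st (i + 1)).2 := by
  by_cases hc : i + 1 ≤ j
  · have hv : rowN A p j (i + 1) = rowN A p j i ++ [p.getD (i + 1) 0] := by
      rw [rowN, if_pos hc]
    have hstep : dstep A p j st (i + 1) =
        (st.1 ++ [p.getD (i + 1) 0],
         (trimN (p.getD (i + 1) 0) st.2.reverse).reverse ++ [(i + 1, p.getD (i + 1) 0)]) := by
      simp [dstep, hc]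
    rw [hstep]
    refine ⟨by rw [h1, ← hv], ?_⟩
    exact push_inv A p j i st.2 st.2 _ h2 ⟨0, rfl⟩ (fun x hx _ => hx)
      (fun hji => absurd hji (by omega)) hv
  · have hji : j ≤ i := by omega
    have harith : i + 1 - j - 1 = i - j := by omega
    have hfm := front_max A p j i hji st.2 h2
    have hv : rowN A p j (i + 1) = rowN A p j i ++ [aN A (i + 1) + mx ((rowN A p j i).drop (i - j))] := by
      rw [rowN, if_neg hc]
    have hstep : dstep A p j st (i + 1) =
        (st.1 ++ [aN A (i + 1) + mx ((rowN A p j i).drop (i - j))],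
         (trimN (aN A (i + 1) + mx ((rowN A p j i).drop (i - j))) (evictN (i - j) st.2).reverse).reverse
           ++ [(i + 1, aN A (i + 1) + mx ((rowN A p j i).drop (i - j)))]) := by
      simp only [dstep]
      rw [if_neg hc]
      simp only [harith, hfm]
    rw [hstep]
    refine ⟨by rw [h1, ← hv], ?_⟩
    refine push_inv A p j i st.2 (evictN (i - j) st.2) _ h2 (evict_drop _ _)
      (fun x hx h => evict_keep _ _ _ hx h) ?_ hv
    intro _ x hx
    exact evict_mem_ge (i - j) st.2 (h2.2.1.imp (fun h => h.1)) x hx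

theorem dstate_main (A p : List Int) (j : Nat) (hj : 1 ≤ j) (m : Nat) :
    (dstate A p j m).1 = rowN A p j m ∧ DqInv A p j m (dstate A p j m).2 := by
  induction m with
  | zero =>
    have h0 : dstate A p j 0 = ([p.getD 0 0], [(0, p.getD 0 0)]) := by
      simp [dstate, dstep, trimN]
    rw [h0]
    refine ⟨rfl, ?_, ?_, ?_, ?_⟩
    · rfl
    · exact List.pairwise_singleton _ _
    · intro x hx
      rw [List.mem_singleton] at hx
      subst hx
      exact ⟨le_refl _, rfl, fun h => absurd h (by omega)⟩
    · intro q hq hlb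
      have : q = 0 := by omega
      subst this
      exact ⟨(0, p.getD 0 0), List.mem_singleton.mpr rfl, le_refl _, le_refl _⟩
  | succ m ih => exact dstep_main A p j m _ ih.1 ih.2

theorem cast_trim (v : Int) (l : List (Nat × Int)) :
    pvTrim v (l.map pvC) = (trimN v l).map pvC := by
  induction l with
  | nil => rfl
  | cons x t ih =>
    by_cases h : x.2 ≤ v
    · simpa [pvTrim, trimN, pvC, h] using ih
    · simp [pvTrim, trimN, pvC, h]

theorem cast_trim' (v : Int) (l : List (Nat × Int)) :
    pvTrim v ((l.map pvC).reverse) = (trimN v l.reverse).map pvC := by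
  rw [← List.map_reverse, cast_trim]

theorem cast_evict (L : Nat) (l : List (Nat × Int)) :
    pvEvict (L : Int) (l.map pvC) = (evictN L l).map pvC := by
  induction l with
  | nil => rfl
  | cons x t ih =>
    by_cases h : x.1 < L
    · have h' : ((x.1 : Int) < (L : Int)) := by exact_mod_cast h
      simpa [pvEvict, evictN, pvC, h, h'] using ih
    · have h' : ¬ ((x.1 : Int) < (L : Int)) := by exact_mod_cast h
      simp [pvEvict, evictN, pvC, h, h']

theorem cast_head (l : List (Nat × Int)) :
    (PySem.List.pyGetD (l.map pvC) 0 ((0 : Int), (0 : Int))).2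
      = (l.headD ((0 : Nat), (0 : Int))).2 := by
  cases l with
  | nil => rw [PySem.List.pyGetD_zero]; rfl
  | cons x t => rw [List.map_cons, PySem.List.pyGetD_zero_cons]; rfl

theorem cast_step (A p : List Int) (j : Nat) (st : List Int × List (Nat × Int)) (i : Nat) :
    (fun (st : List Int × List (Int × Int)) (i : Int) =>
      let vd :=
        if i ≤ (j : Int) then (PySem.List.pyGetD p i 0, st.2)
        else
          (PySem.List.pyGetD A i 0 +
            (PySem.List.pyGetD (pvEvict (i - (j : Int) - 1) st.2) 0 (0, 0)).2,
           pvEvict (i - (j : Int) - 1) st.2)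
      (st.1 ++ [vd.1], (pvTrim vd.1 vd.2.reverse).reverse ++ [(i, vd.1)]))
      (st.1, st.2.map pvC) ((i : Nat) : Int)
    = ((dstep A p j st i).1, (dstep A p j st i).2.map pvC) := by
  by_cases h : i ≤ j
  · have h' : ((i : Int) ≤ (j : Int)) := by exact_mod_cast h
    simp only [dstep]
    rw [if_pos h', if_pos h]
    simp [PySem.List.pyGetD_natCast, cast_trim', pvC]
  · have h' : ¬ ((i : Int) ≤ (j : Int)) := by exact_mod_cast h
    have harith : ((i : Int) - (j : Int) - 1) = ((i - j - 1 : Nat) : Int) := by omega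
    simp only [dstep]
    rw [if_neg h', if_neg h, harith, cast_evict]
    simp [PySem.List.pyGetD_natCast, cast_trim', cast_head, pvC, aN]

theorem castB (A p : List Int) (j m : Nat) :
    (PySem.List.pyRange 0 ((m : Int) + 1) 1).foldl
      (fun (st : List Int × List (Int × Int)) i =>
        let vd :=
          if i ≤ (j : Int) then (PySem.List.pyGetD p i 0, st.2)
          else
            (PySem.List.pyGetD A i 0 +
              (PySem.List.pyGetD (pvEvict (i - (j : Int) - 1) st.2) 0 (0, 0)).2,
             pvEvict (i - (j : Int) - 1) st.2)
        (st.1 ++ [vd.1], (pvTrim vd.1 vd.2.reverse).reverse ++ [(i, vd.1)]))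
      ([], [])
    = ((dstate A p j m).1, (dstate A p j m).2.map pvC) := by
  induction m with
  | zero =>
    have hr : PySem.List.pyRange 0 (((0 : Nat) : Int) + 1) 1 = [((0 : Nat) : Int)] := by
      norm_num
      decide
    rw [hr]
    simp only [List.foldl]
    exact cast_step A p j ([], []) 0
  | succ m ih =>
    have hc1 : ((m + 1 : Nat) : Int) + 1 = ((m : Int) + 1) + 1 := by push_cast; ring
    rw [hc1, PySem.List.pyRange_one_succ_right (by omega : (0 : Int) ≤ (m : Int) + 1),
      List.foldl_append, ih]
    simp only [List.foldl]
    have hc2 : ((m : Int) + 1) = ((m + 1 : Nat) : Int) := by push_cast; ring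
    rw [hc2]
    exact cast_step A p j (dstate A p j m) (m + 1)

theorem Brow (A p : List Int) (j : Nat) (hj : 1 ≤ j) (m : Nat) :
    ((PySem.List.pyRange 0 ((m : Int) + 1) 1).foldl
      (fun (st : List Int × List (Int × Int)) i =>
        let vd :=
          if i ≤ (j : Int) then (PySem.List.pyGetD p i 0, st.2)
          else
            (PySem.List.pyGetD A i 0 +
              (PySem.List.pyGetD (pvEvict (i - (j : Int) - 1) st.2) 0 (0, 0)).2,
             pvEvict (i - (j : Int) - 1) st.2)
        (st.1 ++ [vd.1], (pvTrim vd.1 vd.2.reverse).reverse ++ [(i, vd.1)]))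
      ([], [])).1 = rowN A p j m := by
  rw [castB A p j m]
  exact (dstate_main A p j hj m).1

theorem solution_alt_eq (A : List Int) (h : A ≠ []) :
    solution_alt A = (Rfull A 5).getLastD 0 := by
  have hn : 1 ≤ A.length := List.length_pos_of_ne_nil h
  set m := A.length - 1 with hm
  have hcast : (PySem.List.len A) = ((m : Int) + 1) := by
    simp [PySem.List.len_eq]; omega
  have hr5 : PySem.List.pyRange 1 6 1 = [1, 2, 3, 4, 5] := by decide
  simp only [solution_alt, hcast, hr5, List.foldl, B1]
  have e1 := Brow A (row0 A m) 1 (by omega) m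
  have e2 := Brow A (rowN A (row0 A m) 1 m) 2 (by omega) m
  have e3 := Brow A (rowN A (rowN A (row0 A m) 1 m) 2 m) 3 (by omega) m
  have e4 := Brow A (rowN A (rowN A (rowN A (row0 A m) 1 m) 2 m) 3 m) 4 (by omega) m
  have e5 := Brow A (rowN A (rowN A (rowN A (rowN A (row0 A m) 1 m) 2 m) 3 m) 4 m) 5 (by omega) m
  norm_num at e1 e2 e3 e4 e5
  rw [e1, e2, e3, e4, e5]
  have hR : rowN A (rowN A (rowN A (rowN A (rowN A (row0 A m) 1 m) 2 m) 3 m) 4 m) 5 m = Rfull A 5 := by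
    simp [Rfull, hm]
  have hne : Rfull A 5 ≠ [] := by rw [← hR]; exact rowN_ne_nil _ _ _ _
  rw [hR, PySem.List.pyGetD_neg_one (Rfull A 5) 0 hne,
    List.getLastD_eq_getLast?, List.getLast?_eq_some_getLast hne]
  rfl

-- ===== VERDICT (by name: the statement is the Claim_ definition above) =====
theorem solution_spec : Claim_equal_solution := by
  intro A _ hpre
  unfold Spec_solution
  rw [solution_eq A hpre, solution_alt_eq A hpre]
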